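-- pv_equiv track=rewrite | github.com/Luisnf5/Algorit | Practica2/AEDATA_code.py | repeated_greedy_tsp
-- ===== SOURCE A (Python) =====
-- def greedy_tsp(dist_m, node_ini):
--
--     visited = [node_ini]
--     act_node = node_ini
--
--     if (node_ini > len(dist_m)-1):
--         return None
--
--     while len(visited) < len(dist_m):
--         min_dist = float('inf')
--         for i in range(len(dist_m)):
--             if dist_m[act_node][i] < min_dist and i not in visited:
--                 min_dist = dist_m[act_node][i]
--                 next_node = i
--             else:
--                 continue
--         visited.append(next_node)
--         act_node = next_node
--
--     visited.append(node_ini)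
--
--     return visited
--
-- def len_circuit(circuit, dist_m):
--     suma = 0
--
--     for i in range(len(circuit)-1):
--         suma += dist_m[circuit[i]][circuit[i+1]]
--
--     return suma
--
-- def repeated_greedy_tsp(dist_m):
--
--     best_circuit = []
--     act_circuit = []
--     best_len = float('inf')
--     act_len = float('inf')
--
--     for i in range(len(dist_m)):
--         act_circuit = greedy_tsp(dist_m, i)
--         act_len = len_circuit(act_circuit, dist_m)
--
--         if act_len < best_len:
--             best_len = act_len
--             best_circuit = act_circuit
--
--     return best_circuit
-- ===== SOURCE B (Python) =====
-- def repeated_greedy_tsp(dist_m):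
--     n = len(dist_m)
--     # one sorted adjacency list per row; stable sort keeps equal distances in index order
--     order = [sorted(range(n), key=lambda j: row[j]) for row in dist_m]
--     best_circuit = []
--     best_len = None
--     for i in range(n):
--         visited = {i}
--         act = i
--         total = 0
--         circuit = [i]
--         for _ in range(n - 1):
--             nxt = next(j for j in order[act] if j not in visited)
--             total += dist_m[act][nxt]
--             visited.add(nxt)
--             circuit.append(nxt)
--             act = nxt
--         total += dist_m[act][i]
--         circuit.append(i)
--         if best_len is None or total < best_len:
--             best_len = total
--             best_circuit = circuit
--     return best_circuit
-- ===== Notes on version B (the rewrite author's own statement) =====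
-- stated objective: faster
-- what changed: B precomputes one stably-sorted adjacency list per row (sorted once by distance, ties kept in index order) and picks each next node as the first unvisited entry of that list using a hash set, fusing cost accumulation into the walk, instead of A's per-step full scan of all nodes against a growing visited list plus a separate len_circuit re-summing pass.
import Mathlib
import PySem

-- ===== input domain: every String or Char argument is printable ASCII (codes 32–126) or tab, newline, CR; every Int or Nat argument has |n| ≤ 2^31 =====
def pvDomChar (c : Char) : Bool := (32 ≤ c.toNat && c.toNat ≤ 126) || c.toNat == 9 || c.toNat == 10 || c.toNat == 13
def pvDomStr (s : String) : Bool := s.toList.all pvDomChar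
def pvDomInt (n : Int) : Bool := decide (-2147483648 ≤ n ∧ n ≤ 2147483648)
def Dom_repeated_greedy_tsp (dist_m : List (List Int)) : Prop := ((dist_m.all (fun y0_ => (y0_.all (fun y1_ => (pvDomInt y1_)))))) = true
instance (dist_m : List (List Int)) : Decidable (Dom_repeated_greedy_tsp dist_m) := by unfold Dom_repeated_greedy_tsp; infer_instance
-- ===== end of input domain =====

-- B precomputes one stably-sorted adjacency list per row and walks it with a visited hash set,
-- accumulating the tour length on the fly, instead of A's per-step full scan of all candidates
-- against a growing visited list plus a separate len_circuit re-summing pass (objective: faster;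
-- a timing run measures the speedup).

-- ===== PORT A =====
-- dist_m[a][b]; both indices are in range on every access inside Pre_ (exact there)
def pvD (dist_m : List (List Int)) (a b : Int) : Int :=
  PySem.List.pyGetD (PySem.List.pyGetD dist_m a []) b 0

-- 'd < min_dist' where min_dist starts as float('inf') (none)
def pvLtInf (d : Int) : Option Int → Bool
  | none => true
  | some m => d < m

-- the inner 'for i in range(len(dist_m))' scan of greedy_tsp; state = (min_dist, next_node)
def pvGreedyFor (dist_m : List (List Int)) (visited : List Int) (act : Int)
    (st : Option Int × Int) : Option Int × Int :=
  (PySem.List.pyRange 0 (dist_m.length : Int) 1).foldl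
    (fun s j =>
      if pvLtInf (pvD dist_m act j) s.1 && !(visited.contains j) then (some (pvD dist_m act j), j)
      else s) st

-- the 'while len(visited) < len(dist_m)' loop; fuel = len(dist_m) suffices (one append per pass).
-- next_node is carried as an Int; its initial value 0 stands for Python's not-yet-assigned
-- next_node and is never read inside Pre_ (the first for-pass always assigns it).
def pvGreedyWhile (dist_m : List (List Int)) : Nat → List Int → Int → Int → List Int
  | 0, visited, _, _ => visited
  | fuel+1, visited, act, nx =>
    if visited.length < dist_m.length then
      let s := pvGreedyFor dist_m visited act (none, nx)
      pvGreedyWhile dist_m fuel (visited ++ [s.2]) s.2 s.2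
    else visited

def greedy_tsp (dist_m : List (List Int)) (node_ini : Int) : Option (List Int) :=
  if node_ini > (dist_m.length : Int) - 1 then none
  else some (pvGreedyWhile dist_m dist_m.length [node_ini] node_ini 0 ++ [node_ini])

def len_circuit (circuit : List Int) (dist_m : List (List Int)) : Int :=
  (PySem.List.pyRange 0 ((circuit.length : Int) - 1) 1).foldl
    (fun suma k =>
      suma + pvD dist_m (PySem.List.pyGetD circuit k 0) (PySem.List.pyGetD circuit (k+1) 0)) 0

-- the body of the outer 'for i in range(len(dist_m))' loop; state = (best_len, best_circuit);
-- best_len starts as float('inf') (none); greedy_tsp never returns None for i in range(n), so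
-- '.getD []' is never the None case inside the loop.
def pvRepStep (dist_m : List (List Int)) (st : Option Int × List Int) (i : Int) :
    Option Int × List Int :=
  let act := (greedy_tsp dist_m i).getD []
  let l := len_circuit act dist_m
  if pvLtInf l st.1 then (some l, act) else st

def repeated_greedy_tsp (dist_m : List (List Int)) : List Int :=
  ((PySem.List.pyRange 0 (dist_m.length : Int) 1).foldl (pvRepStep dist_m)
    ((none : Option Int), ([] : List Int))).2

-- ===== PORT B =====
-- order = [sorted(range(n), key=lambda j: row[j]) for row in dist_m]
def pvOrder (dist_m : List (List Int)) : List (List Int) :=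
  dist_m.map (fun row =>
    PySem.List.sorted (PySem.List.pyRange 0 (dist_m.length : Int) 1)
      (fun j => PySem.List.pyGetD row j 0) false)

-- 'best_len is None or total < best_len'
def pvNoneOrLt (total : Int) : Option Int → Bool
  | none => true
  | some b => total < b

-- the 'for _ in range(n-1)' walk; state = (circuit, act, total); visited is a Python set.
-- '.getD 0' is the never-taken none case of next(...) (inside Pre_ an unvisited node exists).
def pvBWalk (dist_m order : List (List Int)) :
    Nat → PySem.Set Int → Int → List Int → Int → List Int × Int × Int
  | 0, _, act, circuit, total => (circuit, act, total)
  | k+1, visited, act, circuit, total =>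
    let nxt := ((PySem.List.pyGetD order act []).find?
        (fun j => !(PySem.Set.contains visited j))).getD 0
    pvBWalk dist_m order k (PySem.Set.add visited nxt) nxt (circuit ++ [nxt])
      (total + pvD dist_m act nxt)

-- one start i: (total with the closing edge, circuit)
def pvBSolve (dist_m order : List (List Int)) (i : Int) : Int × List Int :=
  let r := pvBWalk dist_m order (dist_m.length - 1) (PySem.Set.ofList [i]) i [i] 0
  (r.2.2 + pvD dist_m r.2.1 i, r.1 ++ [i])

-- 'if best_len is None or total < best_len'
def pvBStep (dist_m order : List (List Int)) (st : Option Int × List Int) (i : Int) :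
    Option Int × List Int :=
  let r := pvBSolve dist_m order i
  if pvNoneOrLt r.1 st.1 then (some r.1, r.2) else st

def repeated_greedy_tsp_alt (dist_m : List (List Int)) : List Int :=
  ((PySem.List.pyRange 0 (dist_m.length : Int) 1).foldl
    (pvBStep dist_m (pvOrder dist_m)) ((none : Option Int), ([] : List Int))).2

-- ===== PRECONDITION & SPEC =====
-- Pre_ excludes exactly the inputs on which Python A raises IndexError: some row shorter than the
-- number of rows (for n > 0 every row is indexed at columns up to n-1 across the starts).
def Pre_repeated_greedy_tsp (dist_m : List (List Int)) : Prop :=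
  ∀ row ∈ dist_m, dist_m.length ≤ row.length
instance (dist_m : List (List Int)) : Decidable (Pre_repeated_greedy_tsp dist_m) := by
  unfold Pre_repeated_greedy_tsp; infer_instance
def pvWitness_repeated_greedy_tsp : List (List Int) := [[0, 3], [2, 0]]

def Spec_repeated_greedy_tsp (dist_m : List (List Int)) (out : List Int) : Prop :=
  out = repeated_greedy_tsp_alt dist_m
instance (dist_m : List (List Int)) (out : List Int) :
    Decidable (Spec_repeated_greedy_tsp dist_m out) := by
  unfold Spec_repeated_greedy_tsp; infer_instance

-- ===== CLAIM (what is proved, stated in full; the proofs are below) =====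
def Claim_equal_repeated_greedy_tsp : Prop :=
  ∀ (dist_m : List (List Int)), Dom_repeated_greedy_tsp dist_m →
    Pre_repeated_greedy_tsp dist_m →
    Spec_repeated_greedy_tsp dist_m (repeated_greedy_tsp dist_m)

-- ===== LEMMAS AND PROOFS =====
-- lexicographic '<' on (distance, node) pairs
def pvPLt (p q : Int × Int) : Prop := p.1 < q.1 ∨ (p.1 = q.1 ∧ p.2 < q.2)

-- the tie-break order a stable sort by 'key' realises on a list of distinct indices
def pvLexLt (key : Int → Int) (a b : Int) : Prop :=
  key a < key b ∨ (key a = key b ∧ a < b)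

-- the accumulator step of A's strict-< scan, seen as a lexicographic running minimum
def pvMinStep (m p : Int × Int) : Int × Int :=
  if p.1 < m.1 ∨ (¬ (m.1 < p.1) ∧ p.2 < m.2) then p else m

-- sum of dist_m distances over consecutive pairs of (a :: l)
def pvAdjS (dist_m : List (List Int)) (a : Int) : List Int → Int
  | [] => 0
  | b :: r => pvD dist_m a b + pvAdjS dist_m b r

-- last element of (a :: l)
def pvLastA (a : Int) : List Int → Int
  | [] => a
  | b :: r => pvLastA b r

theorem pvPLt_neg_trans {a b c : Int × Int} (h1 : ¬ pvPLt a b) (h2 : ¬ pvPLt b c) :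
    ¬ pvPLt a c := by
  obtain ⟨a1, a2⟩ := a; obtain ⟨b1, b2⟩ := b; obtain ⟨c1, c2⟩ := c
  simp only [pvPLt, not_or, not_and, not_lt] at *
  omega

theorem pv_fold_min_spec :
    ∀ (l : List (Int × Int)) (x0 : Int × Int),
      l.foldl pvMinStep x0 ∈ x0 :: l ∧ ∀ q ∈ x0 :: l, ¬ pvPLt q (l.foldl pvMinStep x0) := by
  intro l
  induction l with
  | nil =>
    intro x0
    refine ⟨by simp, ?_⟩
    intro q hq
    simp at hq
    subst hq
    simp [pvPLt]
  | cons h t ih =>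
    intro x0
    obtain ⟨ihm, ihlb⟩ := ih (pvMinStep x0 h)
    have hmem : pvMinStep x0 h = x0 ∨ pvMinStep x0 h = h := by
      simp only [pvMinStep]; split_ifs <;> simp
    have hx0 : ¬ pvPLt x0 (pvMinStep x0 h) := by
      obtain ⟨m1, m2⟩ := x0; obtain ⟨p1, p2⟩ := h
      simp only [pvMinStep, pvPLt]
      split_ifs with hc
      · simp_all
        omega
      · simp_all
    have hh : ¬ pvPLt h (pvMinStep x0 h) := by
      obtain ⟨m1, m2⟩ := x0; obtain ⟨p1, p2⟩ := h
      simp only [pvMinStep, pvPLt]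
      split_ifs with hc
      · simp_all
      · simp_all
    have hlbmid : ¬ pvPLt (pvMinStep x0 h) (t.foldl pvMinStep (pvMinStep x0 h)) :=
      ihlb _ (by simp)
    constructor
    · simp only [List.foldl_cons]
      rcases List.mem_cons.mp ihm with hc | hc
      · rw [hc]
        rcases hmem with h1 | h1 <;> simp [h1]
      · simp [hc]
    · intro q hq
      simp only [List.foldl_cons]
      rcases List.mem_cons.mp hq with hc | hc
      · rw [hc]; exact pvPLt_neg_trans hx0 hlbmid
      rcases List.mem_cons.mp hc with hc2 | hc2
      · rw [hc2]; exact pvPLt_neg_trans hh hlbmid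
      · exact ihlb q (by simp [hc2])

theorem pv_insertBy_stable (key : Int → Int) (x : Int) :
    ∀ (ys : List Int), ys.Pairwise (pvLexLt key) → (∀ y ∈ ys, y < x) →
      (PySem.List.insertBy (fun a b => decide (key a < key b)) x ys).Pairwise (pvLexLt key) := by
  intro ys
  induction ys with
  | nil => intro _ _; simp [PySem.List.insertBy]
  | cons y ys ih =>
    intro hpw hlt
    obtain ⟨hy, hpw'⟩ := List.pairwise_cons.mp hpw
    by_cases hk : key x < key y
    · rw [show PySem.List.insertBy (fun a b => decide (key a < key b)) x (y :: ys)
          = x :: y :: ys from by simp [PySem.List.insertBy, hk]]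
      refine List.pairwise_cons.mpr ⟨?_, hpw⟩
      intro z hz
      rcases List.mem_cons.mp hz with hc | hc
      · exact Or.inl (hc ▸ hk)
      · rcases hy z hc with h1 | ⟨h1, _⟩
        · exact Or.inl (lt_trans hk h1)
        · exact Or.inl (h1 ▸ hk)
    · rw [show PySem.List.insertBy (fun a b => decide (key a < key b)) x (y :: ys)
          = y :: PySem.List.insertBy (fun a b => decide (key a < key b)) x ys from by
        simp [PySem.List.insertBy, hk]]
      refine List.pairwise_cons.mpr ⟨?_, ih hpw' (fun z hz => hlt z (by simp [hz]))⟩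
      intro z hz
      rcases (PySem.List.mem_insertBy _ _ _ _).mp hz with hc | hc
      · subst hc
        rcases lt_or_eq_of_le (le_of_not_gt hk) with h1 | h1
        · exact Or.inl h1
        · exact Or.inr ⟨h1, hlt y (by simp)⟩
      · exact hy z hc

theorem pv_sorted_stable (key : Int → Int) :
    ∀ (xs acc : List Int), xs.Pairwise (· < ·) → acc.Pairwise (pvLexLt key) →
      (∀ a ∈ acc, ∀ b ∈ xs, a < b) →
      (xs.foldl (fun acc x => PySem.List.insertBy (fun a b => decide (key a < key b)) x acc)
        acc).Pairwise (pvLexLt key) := by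
  intro xs
  induction xs with
  | nil => intro acc _ h _; simpa using h
  | cons x xs ih =>
    intro acc hxs hacc hlt
    obtain ⟨hx, hxs'⟩ := List.pairwise_cons.mp hxs
    simp only [List.foldl_cons]
    refine ih _ hxs' (pv_insertBy_stable key x acc hacc (fun a ha => hlt a ha x (by simp))) ?_
    intro a ha b hb
    rcases (PySem.List.mem_insertBy _ _ _ _).mp ha with hc | hc
    · exact hc ▸ hx b hb
    · exact hlt a hc b (by simp [hb])

theorem pv_sorted_pairwise_lex (key : Int → Int) (a b : Int) :
    (PySem.List.sorted (PySem.List.pyRange a b 1) key false).Pairwise (pvLexLt key) := by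
  rw [PySem.List.sorted_eq_foldl_insertBy]
  exact pv_sorted_stable key _ [] (PySem.List.pairwise_lt_pyRange_one a b)
    (by simp) (by simp)

-- the first p-satisfying element of a pvLexLt-sorted permutation of R is exactly the
-- lexicographic running minimum A's strict-< scan computes over R.filter p
theorem pv_pick (key : Int → Int) (s R : List Int) (p : Int → Bool)
    (hpw : s.Pairwise (pvLexLt key)) (hperm : s.Perm R)
    (h : Int) (t : List Int) (hL : R.filter p = h :: t) :
    ∃ j, j ∈ h :: t ∧
      (t.map (fun j => (key j, j))).foldl pvMinStep (key h, h) = (key j, j) ∧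
      s.find? p = some j := by
  obtain ⟨hMm, hMlb⟩ := pv_fold_min_spec (t.map (fun j => (key j, j))) (key h, h)
  have hMm' : (t.map (fun j => (key j, j))).foldl pvMinStep (key h, h)
      ∈ (h :: t).map (fun j => (key j, j)) := by simpa using hMm
  obtain ⟨jA, hjA, hjAe⟩ := List.mem_map.mp hMm'
  have hpf : (s.filter p).Perm (h :: t) := hL ▸ hperm.filter p
  have hfne : s.filter p ≠ [] := by
    intro hnil
    have := hpf.length_eq
    rw [hnil] at this
    simp at this
  obtain ⟨h', t', hft⟩ := List.exists_cons_of_ne_nil hfne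
  have hfind : s.find? p = some h' := by
    rw [← List.head?_filter, hft]; rfl
  have hh'L : h' ∈ h :: t := hpf.mem_iff.mp (by rw [hft]; simp)
  have hjAf : jA ∈ h' :: t' := by
    rw [← hft]
    exact hpf.symm.mem_iff.mp hjA
  have hfpw : (h' :: t').Pairwise (pvLexLt key) := hft ▸ hpw.filter p
  have hjAh' : jA = h' := by
    rcases List.mem_cons.mp hjAf with hc | hc
    · exact hc
    · exfalso
      have hlex : pvLexLt key h' jA := (List.pairwise_cons.mp hfpw).1 jA hc
      have : pvPLt (key h', h') (key jA, jA) := by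
        rcases hlex with h1 | ⟨h1, h2⟩
        · exact Or.inl h1
        · exact Or.inr ⟨h1, h2⟩
      have hmm := hMlb (key h', h') (by
        rcases List.mem_cons.mp hh'L with he | he
        · subst he; exact List.mem_cons_self
        · exact List.mem_cons_of_mem _ (List.mem_map.mpr ⟨h', he, rfl⟩))
      rw [← hjAe] at hmm
      exact hmm this
  exact ⟨h', hjAh' ▸ hjA, by rw [← hjAh', hjAe], hfind⟩

-- order[act] is the stably sorted index list for row act
theorem pv_order_row (dist_m : List (List Int)) (act : Int)
    (h0 : 0 ≤ act) (h1 : act < (dist_m.length : Int)) :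
    PySem.List.pyGetD (pvOrder dist_m) act []
      = PySem.List.sorted (PySem.List.pyRange 0 (dist_m.length : Int) 1)
          (pvD dist_m act) false := by
  unfold pvOrder
  rw [PySem.List.pyGetD_eq_getElem _ [] h0 (by simpa using h1), List.getElem_map]
  congr 1
  funext j
  unfold pvD
  rw [PySem.List.pyGetD_eq_getElem _ [] h0 h1]

theorem pv_adjS_append (dist_m : List (List Int)) :
    ∀ (ch : List Int) (a x : Int),
      pvAdjS dist_m a (ch ++ [x]) = pvAdjS dist_m a ch + pvD dist_m (pvLastA a ch) x := by
  intro ch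
  induction ch with
  | nil => intro a x; simp [pvAdjS, pvLastA]
  | cons b r ih => intro a x; simp only [List.cons_append, pvAdjS, pvLastA, ih b x]; ring

theorem pv_lenC_aux (dist_m : List (List Int)) :
    ∀ (r : List Int) (x : Int) (s : Int),
      (List.range r.length).foldl
        (fun acc k => acc + pvD dist_m ((x :: r).getD k 0) ((x :: r).getD (k+1) 0)) s
      = s + pvAdjS dist_m x r := by
  intro r
  induction r with
  | nil => intro x s; simp [pvAdjS]
  | cons y r' ih =>
    intro x s
    simp only [List.length_cons]
    rw [List.range_succ_eq_map, List.foldl_cons, List.foldl_map]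
    simp only [List.getD_cons_zero, List.getD_cons_succ]
    have ih' := ih y (s + pvD dist_m x y)
    simp only [List.getD_cons_succ] at ih'
    rw [ih']
    simp [pvAdjS]; ring

theorem pv_lenC (dist_m : List (List Int)) (x : Int) (r : List Int) :
    len_circuit (x :: r) dist_m = pvAdjS dist_m x r := by
  unfold len_circuit
  rw [show ((x :: r).length : Int) - 1 = (r.length : Int) from by simp, PySem.List.pyRange_one]
  rw [List.foldl_map]
  rw [show (fun (acc : Int) (k : Nat) => acc + pvD dist_m (PySem.List.pyGetD (x :: r) (0 + (k : Int)) 0) (PySem.List.pyGetD (x :: r) ((0 + (k : Int)) + 1) 0))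
      = (fun (acc : Int) (k : Nat) => acc + pvD dist_m ((x :: r).getD k 0) ((x :: r).getD (k+1) 0)) from by
    funext acc k
    have h1 : (0 + (k : Int)) = ((k : Nat) : Int) := by omega
    have h2 : ((k : Int) + 1) = (((k+1 : Nat)) : Int) := by push_cast; ring
    rw [h1, h2, PySem.List.pyGetD_natCast, PySem.List.pyGetD_natCast]]
  rw [show ((r.length : Int) - 0).toNat = r.length from by omega]
  simpa using pv_lenC_aux dist_m r x 0

theorem pv_sel_core (dist_m : List (List Int)) (act : Int) :
    ∀ (t : List Int) (m j0 : Int), (∀ j ∈ t, j0 < j) → t.Pairwise (· < ·) →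
    t.foldl (fun s j =>
        if pvLtInf (pvD dist_m act j) s.1 then (some (pvD dist_m act j), j) else s)
      (some m, j0)
    = ((some ((t.map (fun j => (pvD dist_m act j, j))).foldl pvMinStep (m, j0)).1 : Option Int),
       ((t.map (fun j => (pvD dist_m act j, j))).foldl pvMinStep (m, j0)).2) := by
  intro t
  induction t with
  | nil => intro m j0 _ _; rfl
  | cons h t ih =>
    intro m j0 hlt hpw
    have hj0h : j0 < h := hlt h (by simp)
    have hpwt := (List.pairwise_cons.mp hpw).2
    have hth := (List.pairwise_cons.mp hpw).1
    simp only [List.foldl_cons, List.map_cons]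
    by_cases hc : pvD dist_m act h < m
    · rw [show pvLtInf (pvD dist_m act h) (some m) = true from by simp [pvLtInf, hc], if_pos rfl,
        show pvMinStep (m, j0) (pvD dist_m act h, h) = (pvD dist_m act h, h) from by
          simp only [pvMinStep]; exact if_pos (Or.inl hc)]
      exact ih _ _ hth hpwt
    · rw [show pvLtInf (pvD dist_m act h) (some m) = false from by simp [pvLtInf]; omega,
        show (if (false : Bool) = true then ((some (pvD dist_m act h) : Option Int), h) else ((some m : Option Int), j0)) = ((some m : Option Int), j0) from rfl,
        show pvMinStep (m, j0) (pvD dist_m act h, h) = (m, j0) from by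
          simp only [pvMinStep]; exact if_neg (by rintro (hx | ⟨hx1, hx2⟩) <;> omega)]
      exact ih _ _ (fun j hj => hlt j (by simp [hj])) hpwt

theorem pv_filter_step (N : Int) (visited : List Int) (nxt : Int) :
    ((PySem.List.pyRange 0 N 1).filter (fun j => !(visited.contains j))).erase nxt
    = (PySem.List.pyRange 0 N 1).filter (fun j => !((visited ++ [nxt]).contains j)) := by
  have hnd : ((PySem.List.pyRange 0 N 1).filter (fun j => !(visited.contains j))).Nodup :=
    ((PySem.List.pairwise_lt_pyRange_one 0 N).filter _).imp (fun h => by omega)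
  rw [hnd.erase_eq_filter, List.filter_filter]
  apply List.filter_congr
  intro j _
  by_cases h1 : j = nxt <;> by_cases h2 : j ∈ visited <;> simp [h1, h2]

theorem pv_for_eq (dist_m : List (List Int)) (visited : List Int) (act : Int)
    (st : Option Int × Int) :
    pvGreedyFor dist_m visited act st =
    ((PySem.List.pyRange 0 (dist_m.length : Int) 1).filter
        (fun j => !(visited.contains j))).foldl
      (fun s j => if pvLtInf (pvD dist_m act j) s.1 then (some (pvD dist_m act j), j) else s)
      st := by
  unfold pvGreedyFor
  rw [← PySem.List.foldl_if_eq_foldl_filter]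
  congr 1
  funext s j
  by_cases h1 : j ∈ visited
  · by_cases h2 : pvLtInf (pvD dist_m act j) s.1 = true <;> simp [h1, h2]
  · by_cases h2 : pvLtInf (pvD dist_m act j) s.1 = true <;> simp [h1, h2]

theorem pv_while_eq (dist_m : List (List Int)) :
    ∀ (fa : Nat) (visited : List Int) (act nx total : Int) (circuit : List Int),
    visited.length +
      ((PySem.List.pyRange 0 (dist_m.length : Int) 1).filter
        (fun j => !(visited.contains j))).length = dist_m.length →
    ((PySem.List.pyRange 0 (dist_m.length : Int) 1).filter
        (fun j => !(visited.contains j))).length ≤ fa →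
    0 ≤ act → act < (dist_m.length : Int) →
    ∃ ch, pvGreedyWhile dist_m fa visited act nx = visited ++ ch ∧
      pvBWalk dist_m (pvOrder dist_m)
          ((PySem.List.pyRange 0 (dist_m.length : Int) 1).filter
            (fun j => !(visited.contains j))).length visited act circuit total
        = (circuit ++ ch, pvLastA act ch, total + pvAdjS dist_m act ch) := by
  intro fa
  induction fa with
  | zero =>
    intro visited act nx total circuit hsum hle _ _
    have hnil : ((PySem.List.pyRange 0 (dist_m.length : Int) 1).filter
        (fun j => !(visited.contains j))).length = 0 := by omega
    refine ⟨[], ?_, ?_⟩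
    · simp [pvGreedyWhile]
    · rw [hnil]; simp [pvBWalk, pvLastA, pvAdjS]
  | succ fa ih =>
    intro visited act nx total circuit hsum hle hact0 hact1
    cases hR : (PySem.List.pyRange 0 (dist_m.length : Int) 1).filter
        (fun j => !(visited.contains j)) with
    | nil =>
      refine ⟨[], ?_, ?_⟩
      · rw [hR] at hsum
        simp only [pvGreedyWhile]
        rw [if_neg (by simp at hsum; omega)]
        simp
      · simp [pvBWalk, pvLastA, pvAdjS]
    | cons h t =>
      have hlen : visited.length < dist_m.length := by
        rw [hR] at hsum; simp at hsum; omega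
      have hpwR : ((PySem.List.pyRange 0 (dist_m.length : Int) 1).filter
          (fun j => !(visited.contains j))).Pairwise (· < ·) :=
        (PySem.List.pairwise_lt_pyRange_one 0 (dist_m.length : Int)).filter _
      rw [hR] at hpwR
      have hlt := (List.pairwise_cons.mp hpwR).1
      have hpwt := (List.pairwise_cons.mp hpwR).2
      obtain ⟨jst, hjmem, hjeq, hjfind⟩ := pv_pick (pvD dist_m act)
        (PySem.List.sorted (PySem.List.pyRange 0 (dist_m.length : Int) 1)
          (pvD dist_m act) false)
        (PySem.List.pyRange 0 (dist_m.length : Int) 1) (fun j => !(visited.contains j))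
        (pv_sorted_pairwise_lex (pvD dist_m act) 0 (dist_m.length : Int))
        (PySem.List.sorted_perm _ _ _) h t hR
      -- A's inner scan picks jst
      have hs : pvGreedyFor dist_m visited act (none, nx) = (some (pvD dist_m act jst), jst) := by
        rw [pv_for_eq, hR, List.foldl_cons,
          show (if pvLtInf (pvD dist_m act h) ((none : Option Int), nx).1
              then ((some (pvD dist_m act h) : Option Int), h) else ((none : Option Int), nx))
            = ((some (pvD dist_m act h) : Option Int), h) from rfl,
          pv_sel_core dist_m act t (pvD dist_m act h) h hlt hpwt, hjeq]
      -- jst facts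
      have hjR : jst ∈ (PySem.List.pyRange 0 (dist_m.length : Int) 1).filter
          (fun j => !(visited.contains j)) := by rw [hR]; exact hjmem
      have hjrng := PySem.List.mem_pyRange_one.mp (List.mem_of_mem_filter hjR)
      have hjnv : ¬ visited.contains jst := by
        have := List.of_mem_filter hjR
        simpa using this
      -- B's set add is list append
      have hjnv' : jst ∉ visited := by simpa using hjnv
      have hadd : PySem.Set.add visited jst = visited ++ [jst] := by
        simp [PySem.Set.add, PySem.Set.contains, hjnv']
      -- new-state bookkeeping
      have hsum' : (visited ++ [jst]).length +
          ((PySem.List.pyRange 0 (dist_m.length : Int) 1).filter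
            (fun j => !((visited ++ [jst]).contains j))).length = dist_m.length := by
        rw [← pv_filter_step _ _ jst, hR, List.length_erase_of_mem hjmem]
        rw [hR] at hsum
        simp at hsum ⊢
        omega
      have hlen' : ((PySem.List.pyRange 0 (dist_m.length : Int) 1).filter
          (fun j => !((visited ++ [jst]).contains j))).length = t.length := by
        rw [← pv_filter_step _ _ jst, hR, List.length_erase_of_mem hjmem]
        simp
      obtain ⟨ch', hA', hB'⟩ := ih (visited ++ [jst]) jst jst (total + pvD dist_m act jst)
        (circuit ++ [jst]) hsum' (by rw [hlen']; rw [hR] at hle; simp at hle; omega)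
        hjrng.1 hjrng.2
      refine ⟨jst :: ch', ?_, ?_⟩
      · simp only [pvGreedyWhile]
        rw [if_pos hlen]
        simp only [hs]
        rw [hA']
        simp
      · simp only [List.length_cons, pvBWalk]
        rw [show ((PySem.List.pyGetD (pvOrder dist_m) act []).find?
              (fun j => !(PySem.Set.contains visited j))).getD 0 = jst from by
          rw [pv_order_row dist_m act hact0 hact1,
            show (fun j => !(PySem.Set.contains visited j))
              = (fun j => !(visited.contains j)) from rfl, hjfind]
          rfl]
        rw [hadd, ← hlen', hB']
        simp only [pvAdjS, pvLastA, List.append_assoc, List.cons_append, List.nil_append,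
          Prod.mk.injEq]
        exact ⟨trivial, trivial, by ring⟩

theorem pv_solve_spec (dist_m : List (List Int)) (i : Int)
    (h0 : 0 ≤ i) (h1 : i < (dist_m.length : Int)) :
    (greedy_tsp dist_m i).getD [] = (pvBSolve dist_m (pvOrder dist_m) i).2 ∧
    len_circuit ((greedy_tsp dist_m i).getD []) dist_m
      = (pvBSolve dist_m (pvOrder dist_m) i).1 := by
  have hi : i ∈ PySem.List.pyRange 0 (dist_m.length : Int) 1 :=
    (PySem.List.mem_pyRange_one).mpr ⟨h0, h1⟩
  have hnd : (PySem.List.pyRange 0 (dist_m.length : Int) 1).Nodup :=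
    PySem.List.nodup_pyRange_one 0 (dist_m.length : Int)
  have hlenr : (PySem.List.pyRange 0 (dist_m.length : Int) 1).length = dist_m.length := by
    rw [PySem.List.length_pyRange_one]; omega
  have hfeq : (PySem.List.pyRange 0 (dist_m.length : Int) 1).filter
        (fun j => !(([i] : List Int).contains j))
      = (PySem.List.pyRange 0 (dist_m.length : Int) 1).erase i := by
    rw [List.Nodup.erase_eq_filter hnd i]
    apply List.filter_congr
    intro j _
    by_cases h : j = i <;> simp [h]
  have hsum : ([i] : List Int).length +
      ((PySem.List.pyRange 0 (dist_m.length : Int) 1).filter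
        (fun j => !(([i] : List Int).contains j))).length = dist_m.length := by
    rw [hfeq, List.length_erase_of_mem hi, hlenr]
    simp only [List.length_singleton]
    omega
  obtain ⟨ch, hA, hB⟩ := pv_while_eq dist_m dist_m.length [i] i 0 0 [i] hsum
    (by omega) h0 h1
  have hguard : ¬ (i > (dist_m.length : Int) - 1) := by omega
  have hg : greedy_tsp dist_m i = some (([i] ++ ch) ++ [i]) := by
    unfold greedy_tsp
    rw [if_neg hguard, hA]
  have hfuel : dist_m.length - 1
      = ((PySem.List.pyRange 0 (dist_m.length : Int) 1).filter
          (fun j => !(([i] : List Int).contains j))).length := by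
    rw [hfeq, List.length_erase_of_mem hi, hlenr]
  have hof : PySem.Set.ofList ([i] : List Int) = ([i] : List Int) := rfl
  have hBs : pvBSolve dist_m (pvOrder dist_m) i
      = ((0 + pvAdjS dist_m i ch) + pvD dist_m (pvLastA i ch) i, ([i] ++ ch) ++ [i]) := by
    unfold pvBSolve
    rw [hfuel, hof, hB]
  constructor
  · rw [hg, hBs]; rfl
  · rw [hg, hBs]
    simp only [Option.getD_some]
    rw [show ([i] ++ ch) ++ [i] = i :: (ch ++ [i]) from by simp, pv_lenC,
      pv_adjS_append]
    ring

theorem pv_main (dist_m : List (List Int)) :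
    repeated_greedy_tsp dist_m = repeated_greedy_tsp_alt dist_m := by
  unfold repeated_greedy_tsp repeated_greedy_tsp_alt
  rw [PySem.List.foldl_congr_mem _ (pvRepStep dist_m) (pvBStep dist_m (pvOrder dist_m)) _ ?_]
  intro st i hi
  obtain ⟨hrng0, hrng1⟩ := PySem.List.mem_pyRange_one.mp hi
  obtain ⟨hcirc, hlen⟩ := pv_solve_spec dist_m i hrng0 hrng1
  show (if pvLtInf (len_circuit ((greedy_tsp dist_m i).getD []) dist_m) st.1
      then (some (len_circuit ((greedy_tsp dist_m i).getD []) dist_m),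
            (greedy_tsp dist_m i).getD [])
      else st)
    = (if pvNoneOrLt (pvBSolve dist_m (pvOrder dist_m) i).1 st.1
      then (some (pvBSolve dist_m (pvOrder dist_m) i).1, (pvBSolve dist_m (pvOrder dist_m) i).2)
      else st)
  rw [hlen, hcirc]
  cases st.1 <;> rfl

-- ===== VERDICT (by name: the statement is the Claim_ definition above) =====
theorem repeated_greedy_tsp_spec : Claim_equal_repeated_greedy_tsp := by
  intro dist_m _ _
  unfold Spec_repeated_greedy_tsp
  exact pv_main dist_m
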